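-- pv_equiv track=rewrite | github.com/aepaysinger/code-challenges | code_challenges/adhoc/sum_most_frequent.py | sum_most_frequent_numbers
-- ===== SOURCE A (Python) =====
-- def sum_most_frequent_numbers(numbers):
--     counts = {}
--     for number in numbers:
--         if number in counts:
--             counts[number] += 1
--         else:
--             counts[number] = 1
--     num_a = 0
--     num_a_count = 0
--     num_b = 0
--     num_b_count = 0
--     for number in counts:
--         if counts[number] >= num_a_count:
--             num_b = num_a
--             num_b_count = num_a_count
--             num_a = number
--             num_a_count = counts[number]
--         elif counts[number] >= num_b_count:
--             num_b_count = counts[number]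
--             num_b = number
--
--     return num_a + num_b
-- ===== SOURCE B (Python) =====
-- def sum_most_frequent_numbers(numbers):
--     counts = {}
--     for number in numbers:
--         counts[number] = counts.get(number, 0) + 1
--     return sum(num for num, _ in sorted(counts.items(), key=lambda kv: kv[1])[-2:])
-- ===== Notes on version B (the rewrite author's own statement) =====
-- stated objective: simpler
-- what changed: Replaces A's hand-rolled four-variable >=-cascade that tracks the top two (number, count) pairs with a stable ascending sort of the counter's items by count, summing the numbers of the last two items.
import Mathlib
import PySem

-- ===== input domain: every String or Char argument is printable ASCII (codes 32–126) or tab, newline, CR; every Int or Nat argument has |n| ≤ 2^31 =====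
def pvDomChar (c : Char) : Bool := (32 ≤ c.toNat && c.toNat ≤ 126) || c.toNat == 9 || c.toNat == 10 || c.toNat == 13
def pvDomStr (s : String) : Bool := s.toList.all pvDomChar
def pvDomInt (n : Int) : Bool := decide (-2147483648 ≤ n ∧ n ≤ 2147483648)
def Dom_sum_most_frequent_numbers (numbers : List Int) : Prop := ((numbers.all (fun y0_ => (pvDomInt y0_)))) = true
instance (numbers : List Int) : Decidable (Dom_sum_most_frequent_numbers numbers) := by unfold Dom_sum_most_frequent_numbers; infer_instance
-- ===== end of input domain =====

-- B replaces A's hand-rolled >=-cascade over the dict with a stable ascending sort by count and sums the last two items (objective: simpler).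

-- ===== PORT A =====
def sum_most_frequent_numbers (numbers : List Int) : Int :=
  let counts : PySem.Dict Int Int := numbers.foldl (fun d number =>
    if d.contains number then d.insert number (d.getD number 0 + 1)
    else d.insert number 1) PySem.Dict.empty
  let st : Int × Int × Int × Int := counts.keys.foldl (fun st number =>
    if counts.getD number 0 ≥ st.2.1 then
      (number, counts.getD number 0, st.1, st.2.1)
    else if counts.getD number 0 ≥ st.2.2.2 then
      (st.1, st.2.1, number, counts.getD number 0)
    else st) (0, 0, 0, 0)
  st.1 + st.2.2.1

-- ===== PORT B =====
def sum_most_frequent_numbers_alt (numbers : List Int) : Int :=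
  let counts : PySem.Dict Int Int := numbers.foldl (fun d number =>
    d.insert number (d.getD number 0 + 1)) PySem.Dict.empty
  (((PySem.List.slice (PySem.List.sorted counts.items (fun kv => kv.2)) (some (-2)) none)).map (fun kv => kv.1)).sum

-- ===== PRECONDITION & SPEC =====
def Spec_sum_most_frequent_numbers (numbers : List Int) (out : Int) : Prop := out = sum_most_frequent_numbers_alt numbers
instance (numbers : List Int) (out : Int) : Decidable (Spec_sum_most_frequent_numbers numbers out) := by unfold Spec_sum_most_frequent_numbers; infer_instance

-- ===== CLAIM (what is proved, stated in full; the proofs are below) =====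
def Claim_equal_sum_most_frequent_numbers : Prop := ∀ (numbers : List Int), Dom_sum_most_frequent_numbers numbers → Spec_sum_most_frequent_numbers numbers (sum_most_frequent_numbers numbers)

-- ===== LEMMAS AND PROOFS =====

-- A's loop step on a (number, count) pair, as a standalone function.
def pvStep (st : Int × Int × Int × Int) (p : Int × Int) : Int × Int × Int × Int :=
  if p.2 ≥ st.2.1 then (p.1, p.2, st.1, st.2.1)
  else if p.2 ≥ st.2.2.2 then (st.1, st.2.1, p.1, p.2)
  else st

-- (num_a, num_a_count, num_b, num_b_count) read off a count-ascending list: last element and the one before it.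
def pvTops : List (Int × Int) → Int × Int × Int × Int
  | [] => (0, 0, 0, 0)
  | [x] => (x.1, x.2, 0, 0)
  | [y, x] => (x.1, x.2, y.1, y.2)
  | _ :: y :: x :: t => pvTops (y :: x :: t)

lemma pvTops_cons_of_two_le (a : Int × Int) (u : List (Int × Int)) (h : 2 ≤ u.length) :
    pvTops (a :: u) = pvTops u := by
  match u, h with
  | y :: x :: t, _ => rfl

lemma pvStep_id_of_lt (p : Int × Int) :
    ∀ (s : List (Int × Int)), 2 ≤ s.length → (∀ q ∈ s, p.2 < q.2) → pvStep (pvTops s) p = pvTops s := by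
  intro s
  induction s with
  | nil => intro h; simp at h
  | cons a u ih =>
    intro hlen hall
    rcases u with _ | ⟨x, u'⟩
    · simp at hlen
    · rcases u' with _ | ⟨w, t⟩
      · have h1 := hall a (by simp)
        have h2 := hall x (by simp)
        simp only [pvTops, pvStep]
        rw [if_neg (by simp; omega), if_neg (by simp; omega)]
      · rw [pvTops_cons_of_two_le a _ (by simp)]
        exact ih (by simp) (fun q hq => hall q (by simp at hq ⊢; tauto))

lemma pvIns_tops (p : Int × Int) (hp : 1 ≤ p.2) :
    ∀ (s : List (Int × Int)), s.Pairwise (fun a b => a.2 ≤ b.2) →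
      pvStep (pvTops s) p = pvTops (PySem.List.insertBy (fun a b => decide (a.2 < b.2)) p s) := by
  intro s
  induction s with
  | nil =>
    intro _
    simp only [PySem.List.insertBy, pvTops, pvStep]
    rw [if_pos (by simp; omega)]
  | cons y ys ih =>
    intro hpw
    rw [List.pairwise_cons] at hpw
    obtain ⟨hy, hys⟩ := hpw
    by_cases hlt : p.2 < y.2
    · -- p is inserted before y
      have hins : PySem.List.insertBy (fun a b => decide (a.2 < b.2)) p (y :: ys) = p :: y :: ys := by
        simp [PySem.List.insertBy, hlt]
      rw [hins]
      rcases ys with _ | ⟨x, t⟩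
      · simp only [pvTops, pvStep]
        rw [if_neg (by simp; omega), if_pos (by simp; omega)]
      · rw [pvTops_cons_of_two_le p _ (by simp)]
        exact pvStep_id_of_lt p (y :: x :: t) (by simp)
          (fun q hq => by
            rcases List.mem_cons.mp hq with h | h
            · subst h; omega
            · have := hy q h; omega)
    · -- p passes y
      have hins : PySem.List.insertBy (fun a b => decide (a.2 < b.2)) p (y :: ys)
          = y :: PySem.List.insertBy (fun a b => decide (a.2 < b.2)) p ys := by
        simp [PySem.List.insertBy, hlt]
      rw [hins]
      rcases ys with _ | ⟨z, ys'⟩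
      · simp only [PySem.List.insertBy, pvTops, pvStep]
        rw [if_pos (by simp; omega)]
      · rcases ys' with _ | ⟨w, t⟩
        · by_cases hz : p.2 < z.2
          · have : PySem.List.insertBy (fun a b => decide (a.2 < b.2)) p [z] = [p, z] := by
              simp [PySem.List.insertBy, hz]
            rw [this]
            simp only [pvTops, pvStep]
            rw [if_neg (by simp; omega), if_pos (by simp; omega)]
          · have : PySem.List.insertBy (fun a b => decide (a.2 < b.2)) p [z] = [z, p] := by
              simp [PySem.List.insertBy, hz]
            rw [this]
            simp only [pvTops, pvStep]
            rw [if_pos (by simp; omega)]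
        · rw [pvTops_cons_of_two_le y _ (by simp)]
          have hlen2 : ∀ (v : List (Int × Int)),
              (PySem.List.insertBy (fun a b => decide (a.2 < b.2)) p v).length = v.length + 1 := by
            intro v
            induction v with
            | nil => simp [PySem.List.insertBy]
            | cons c cs ihc =>
              by_cases hc : p.2 < c.2 <;> simp [PySem.List.insertBy, hc, ihc]
          rw [pvTops_cons_of_two_le y _ (by rw [hlen2]; simp)]
          exact ih hys

-- the cascade over any list of pairs with counts ≥ 1 computes the last-two of the stable ascending sort
lemma pvFold_eq_tops (l : List (Int × Int)) (hl : ∀ p ∈ l, 1 ≤ p.2) :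
    l.foldl pvStep (0, 0, 0, 0) = pvTops (PySem.List.sorted l (fun kv => kv.2)) := by
  induction l using List.reverseRecOn with
  | nil => simp [PySem.List.sorted_eq_foldl_insertBy, pvTops]
  | append_singleton l p ih =>
    rw [List.foldl_append]
    rw [PySem.List.sorted_eq_foldl_insertBy, List.foldl_append]
    simp only [List.foldl_cons, List.foldl_nil]
    rw [← PySem.List.sorted_eq_foldl_insertBy]
    rw [ih (fun q hq => hl q (by simp [hq]))]
    exact pvIns_tops p (hl p (by simp)) _ (PySem.List.sorted_pairwise l (fun kv => kv.2))

lemma pvSlice_neg2_eq_drop (s : List (Int × Int)) :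
    PySem.List.slice s (some (-2)) none = s.drop (s.length - 2) := by
  simp only [PySem.List.slice, PySem.List.clampIdx]
  split_ifs with h1 h2
  · rw [show s.length - 2 = 0 by omega]
    simp
  · have : ((s.length : Int) + (-2)).toNat = s.length - 2 := by omega
    rw [this]
    have : s.length - (s.length - 2) = (s.drop (s.length - 2)).length := by simp
    rw [this, List.take_length]
  · omega

lemma pvSum_slice_eq_tops (s : List (Int × Int)) :
    ((PySem.List.slice s (some (-2)) none).map (fun kv => kv.1)).sum
      = (pvTops s).1 + (pvTops s).2.2.1 := by
  induction s using pvTops.induct with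
  | case1 => simp [pvSlice_neg2_eq_drop, pvTops]
  | case2 x => simp [pvSlice_neg2_eq_drop, pvTops]
  | case3 y x => simp [pvSlice_neg2_eq_drop, pvTops]; ring
  | case4 a y x t ih =>
    rw [pvTops_cons_of_two_le a _ (by simp)]
    rw [pvSlice_neg2_eq_drop] at *
    have hL : (a :: y :: x :: t).length - 2 = ((y :: x :: t).length - 2) + 1 := by simp
    rw [hL, List.drop_succ_cons]
    exact ih

-- both ports build collections.Counter(numbers)
lemma pvCountsA_eq_counter (numbers : List Int) :
    numbers.foldl (fun d number =>
      if d.contains number then d.insert number (d.getD number 0 + 1)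
      else d.insert number 1) PySem.Dict.empty = PySem.Dict.counter numbers := by
  rw [← PySem.Dict.foldl_insert_getD_add_one_eq_counter]
  have hf : (fun (d : PySem.Dict Int Int) (number : Int) =>
        if d.contains number then d.insert number (d.getD number 0 + 1) else d.insert number 1)
      = fun d number => d.insert number (d.getD number 0 + 1) := by
    funext d n
    by_cases h : d.contains n
    · simp [h]
    · have h0 : d.getD n 0 = 0 := PySem.Dict.getD_of_not_contains d 0 (by simpa using h)
      simp [h, h0]
  rw [hf]

-- ===== VERDICT (by name: the statement is the Claim_ definition above) =====
theorem sum_most_frequent_numbers_spec : Claim_equal_sum_most_frequent_numbers := by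
  intro numbers _
  unfold Spec_sum_most_frequent_numbers
  unfold sum_most_frequent_numbers sum_most_frequent_numbers_alt
  rw [pvCountsA_eq_counter, PySem.Dict.foldl_insert_getD_add_one_eq_counter]
  simp only [PySem.Dict.keys_counter, PySem.Dict.getD_counter, PySem.Dict.items_counter]
  have hA : ((PySem.Set.ofList numbers).foldl (fun st (number : Int) =>
        if ((numbers.count number : Int)) ≥ st.2.1 then (number, ((numbers.count number : Int)), st.1, st.2.1)
        else if ((numbers.count number : Int)) ≥ st.2.2.2 then (st.1, st.2.1, number, ((numbers.count number : Int)))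
        else st) ((0 : Int), (0 : Int), (0 : Int), (0 : Int)))
      = ((PySem.Set.ofList numbers).map (fun k => (k, (numbers.count k : Int)))).foldl pvStep (0, 0, 0, 0) := by
    rw [List.foldl_map]
    simp only [pvStep]
  rw [hA]
  rw [pvFold_eq_tops _ (by
    intro p hp
    simp only [List.mem_map] at hp
    obtain ⟨k, hk, rfl⟩ := hp
    have : k ∈ numbers := (PySem.Set.mem_ofList numbers k).mp hk
    have := List.count_pos_iff.mpr this
    simp; omega)]
  rw [pvSum_slice_eq_tops]
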